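-- pv_equiv track=rewrite | github.com/KimJinSuAI/CodingTestPractice | 프로그래머스/Level4/쿠키 구입(누적합accumulate, unpacking).py | solution
-- ===== SOURCE A (Python) =====
-- def solution(cookie):
--     answer = 0
--     for l in range(0,len(cookie)-1):
--         r = l+1
--         m = l
--         left = cookie[m]
--         right = cookie[r]
--         while r!=len(cookie):
--             if left<right:
--                 m+=1
--                 left+=cookie[m]
--                 right-=cookie[m]
--                 if m>r:
--                     r+=1
--                     if r==len(cookie):
--                         break
--                     right+=cookie[r]
--             elif left>right:
--                 r+=1
--                 if r==len(cookie):
--                     break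
--                 right+=cookie[r]
--             else:
--                 answer = max(answer,left)
--                 r+=1
--                 if r==len(cookie):
--                     break
--                 right+=cookie[r]
--     return answer
-- ===== SOURCE B (Python) =====
-- def solution(cookie):
--     # For each split boundary m, intersect the set of right-side sums starting at
--     # m+1 with the left-side sums ending at m, via prefix sums; keep the best match.
--     n = len(cookie)
--     P = [0]
--     s = 0
--     for x in cookie:
--         s += x
--         P.append(s)
--     best = 0
--     for m in range(n - 1):
--         rights = {P[r + 1] - P[m + 1] for r in range(m + 1, n)}
--         for l in range(m + 1):
--             v = P[m + 1] - P[l]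
--             if v > best and v in rights:
--                 best = v
--     return best
-- ===== Notes on version B (the rewrite author's own statement) =====
-- stated objective: alternative
-- what changed: Replaces A's per-start two-pointer sweep (incremental left/right sums with a pointer-overtake patch-up) by a per-boundary scan that intersects, via one precomputed prefix-sum array, the set of right-side sums starting after the boundary with the left-side sums ending at it.
-- outside the precondition, e.g. on solution([2, -1, 1]): A returns 0, B returns 1; on solution([-5, 1]): A raises IndexError, B returns 0
import Mathlib
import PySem

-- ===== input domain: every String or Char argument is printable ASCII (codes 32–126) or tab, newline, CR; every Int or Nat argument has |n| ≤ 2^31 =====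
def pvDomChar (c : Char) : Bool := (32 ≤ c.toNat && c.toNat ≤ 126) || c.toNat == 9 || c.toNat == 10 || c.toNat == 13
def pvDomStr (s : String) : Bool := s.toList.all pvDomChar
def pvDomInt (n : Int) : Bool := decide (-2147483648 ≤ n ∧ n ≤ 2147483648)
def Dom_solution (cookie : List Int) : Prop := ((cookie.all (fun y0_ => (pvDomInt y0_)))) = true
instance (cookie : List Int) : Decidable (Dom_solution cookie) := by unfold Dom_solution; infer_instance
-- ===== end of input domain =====

-- B replaces A's per-start two-pointer sweep by a per-boundary intersection of
-- left-sum and right-sum sets over one prefix-sum array (alternative algorithm, same O(n^2)).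


-- ===== PORT A =====
-- (used by solutionLoop's termination proof)
lemma pvMeasureBoth (len m r : Int) (h1 : m + 1 < len) (h2 : r + 1 < len) :
    (len + 1 - (m + 1)).toNat + (len + 1 - (r + 1)).toNat <
      (len + 1 - m).toNat + (len + 1 - r).toNat := by omega

lemma pvMeasureM (len m r : Int) (h1 : m + 1 < len) :
    (len + 1 - (m + 1)).toNat + (len + 1 - r).toNat <
      (len + 1 - m).toNat + (len + 1 - r).toNat := by omega

lemma pvMeasureR (len m r : Int) (h2 : r + 1 < len) :
    (len + 1 - m).toNat + (len + 1 - (r + 1)).toNat <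
      (len + 1 - m).toNat + (len + 1 - r).toNat := by omega

lemma pvGetSomeLt {xs : List Int} {i v : Int} (h : PySem.List.pyGet? xs i = some v) : i < (xs.length : Int) := by
  have hin : PySem.Raise.InRange xs.length i := by
    by_contra hc
    rw [(PySem.List.pyGet?_eq_none_iff xs i).mpr hc] at h; cases h
  unfold PySem.Raise.InRange at hin; omega

-- A's inner 'while r != len(cookie)' loop, state (m, r, left, right, answer).
-- Each 'cookie[i]' is PySem.List.pyGet?; on 'none' Python raises IndexError (the
-- 'left < right' branch can reach index len(cookie)) — those inputs are outside Pre_.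
def solutionLoop (cookie : List Int) (n m r left right ans : Int) : Int :=
  if _hr : r = n then ans
  else if _hlt : left < right then
    match _hm : PySem.List.pyGet? cookie (m + 1) with
    | none => ans               -- Python: IndexError (excluded by Pre_solution)
    | some c =>
      if _hd : m + 1 > r then
        if _hrn : r + 1 = n then ans
        else
          match _hr2 : PySem.List.pyGet? cookie (r + 1) with
          | none => ans         -- unreachable: r + 1 < n
          | some d => solutionLoop cookie n (m + 1) (r + 1) (left + c) (right - c + d) ans
      else solutionLoop cookie n (m + 1) r (left + c) (right - c) ans
  else if _hgt : right < left then
    if _hrn : r + 1 = n then ans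
    else
      match _hr2 : PySem.List.pyGet? cookie (r + 1) with
      | none => ans             -- unreachable: r + 1 < n
      | some d => solutionLoop cookie n m (r + 1) left (right + d) ans
  else
    if _hrn : r + 1 = n then max ans left
    else
      match _hr2 : PySem.List.pyGet? cookie (r + 1) with
      | none => max ans left    -- unreachable: r + 1 < n
      | some d => solutionLoop cookie n m (r + 1) left (right + d) (max ans left)
termination_by (((cookie.length : Int) + 1 - m).toNat + ((cookie.length : Int) + 1 - r).toNat)
decreasing_by
  · exact pvMeasureBoth _ _ _ (pvGetSomeLt _hm) (pvGetSomeLt _hr2)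
  · exact pvMeasureM _ _ _ (pvGetSomeLt _hm)
  · exact pvMeasureR _ _ _ (pvGetSomeLt _hr2)
  · exact pvMeasureR _ _ _ (pvGetSomeLt _hr2)

-- A: answer = 0; for l in range(0, len(cookie)-1): seed m=l, r=l+1, left=cookie[m],
-- right=cookie[r] (both always in range for l in this range), then run the while loop.
def solution (cookie : List Int) : Int :=
  (PySem.List.pyRange 0 ((cookie.length : Int) - 1) 1).foldl (fun ans l =>
    match PySem.List.pyGet? cookie l, PySem.List.pyGet? cookie (l + 1) with
    | some left, some right =>
        solutionLoop cookie (cookie.length : Int) l (l + 1) left right ans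
    | _, _ => ans               -- unreachable: 0 ≤ l < len - 1
    ) 0

-- ===== PORT B =====
-- prefix sums: P = [0]; s = 0; for x in cookie: s += x; P.append(s)
def solutionAltP (cookie : List Int) : List Int × Int :=
  cookie.foldl (fun ps x => (ps.1 ++ [ps.2 + x], ps.2 + x)) ([0], 0)

-- B: for each boundary m, build the set of right-side sums starting at m+1 and scan
-- the left-side sums ending at m; all P-indices are in range by construction, so
-- pyGetD's default is never read.
def solution_alt (cookie : List Int) : Int :=
  let n : Int := (cookie.length : Int)
  let P : List Int := (solutionAltP cookie).1
  (PySem.List.pyRange 0 (n - 1) 1).foldl (fun best m =>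
    let rights : PySem.Set Int :=
      PySem.Set.ofList ((PySem.List.pyRange (m + 1) n 1).map (fun r =>
        PySem.List.pyGetD P (r + 1) 0 - PySem.List.pyGetD P (m + 1) 0))
    (PySem.List.pyRange 0 (m + 1) 1).foldl (fun best l =>
      let v := PySem.List.pyGetD P (m + 1) 0 - PySem.List.pyGetD P l 0
      if best < v ∧ PySem.Set.contains rights v then v else best) best) 0

-- ===== PRECONDITION & SPEC =====
-- Pre_ restricts to nonnegative cookie counts, the problem's natural domain: on lists
-- with a negative entry A's sweep can raise IndexError, and where it does return, the
-- value is an artefact of the accidental pointer path (e.g. A returns 0 on [2, -1, 1]).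
def Pre_solution (cookie : List Int) : Prop := ∀ x ∈ cookie, 0 ≤ x
instance (cookie : List Int) : Decidable (Pre_solution cookie) := by unfold Pre_solution; infer_instance
def pvWitness_solution : List Int := [1, 1, 2, 3]
def Spec_solution (cookie : List Int) (out : Int) : Prop := out = solution_alt cookie
instance (cookie : List Int) (out : Int) : Decidable (Spec_solution cookie out) := by unfold Spec_solution; infer_instance

-- ===== CLAIM (what is proved, stated in full; the proofs are below) =====
def Claim_equal_solution : Prop := ∀ (cookie : List Int), Dom_solution cookie → Pre_solution cookie → Spec_solution cookie (solution cookie)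

-- ===== LEMMAS AND PROOFS =====

-- pvPre c k = sum of the first k entries (Python prefix sum P[k])
def pvPre (c : List Int) (k : Int) : Int := ((c.take k.toNat).sum)

-- 'v is the sum of an equal adjacent pair of contiguous runs': v = sum c[l:j] = sum c[j:k]
def pvIsEq (c : List Int) (v : Int) : Prop :=
  ∃ l j k : Int, 0 ≤ l ∧ l < j ∧ j < k ∧ k ≤ (c.length : Int) ∧
    2 * pvPre c j = pvPre c l + pvPre c k ∧ v = pvPre c j - pvPre c l

lemma pvPre_succ (c : List Int) (i v : Int) (h0 : 0 ≤ i)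
    (hv : PySem.List.pyGet? c i = some v) : pvPre c (i + 1) = pvPre c i + v := by
  rw [PySem.List.pyGet?_of_nonneg c h0] at hv
  obtain ⟨hlt, hval⟩ := List.getElem?_eq_some_iff.mp hv
  unfold pvPre
  have h1 : (i + 1).toNat = i.toNat + 1 := by omega
  rw [h1, List.take_add_one, List.sum_append]
  rw [List.getElem?_eq_getElem hlt] at hv ⊢
  simp at hv ⊢
  omega

lemma pvPre_mono (c : List Int) (hnn : ∀ x ∈ c, 0 ≤ x) (i j : Int) (_h0 : 0 ≤ i)
    (hij : i ≤ j) : pvPre c i ≤ pvPre c j := by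
  unfold pvPre
  have h1 : j.toNat = i.toNat + (j.toNat - i.toNat) := by omega
  rw [h1, List.take_add, List.sum_append]
  have h2 : 0 ≤ (List.take (j.toNat - i.toNat) (List.drop i.toNat c)).sum := by
    apply List.sum_nonneg
    intro x hx
    exact hnn x (List.mem_of_mem_drop (List.mem_of_mem_take hx))
  omega

lemma pvGet_in_range (c : List Int) (i : Int) (h0 : 0 ≤ i) (h : i < (c.length : Int)) :
    ∃ v, PySem.List.pyGet? c i = some v := by
  have hlt : i.toNat < c.length := by omega
  refine ⟨c.get ⟨i.toNat, hlt⟩, ?_⟩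
  rw [PySem.List.pyGet?_of_nonneg c h0]
  simp [List.getElem?_eq_getElem hlt]

-- (a) the running answer only grows
lemma solutionLoop_ge (cookie : List Int) (n m r left right ans : Int) :
    ans ≤ solutionLoop cookie n m r left right ans := by
  induction m, r, left, right, ans using solutionLoop.induct (cookie := cookie) (n := n) with
  | case1 m left right ans => rw [solutionLoop]; simp
  | case2 m r left right ans h1 h2 h3 => rw [solutionLoop, dif_neg h1, dif_pos h2, h3]
  | case3 m r left right ans h1 h2 d h3 h4 h5 =>
      rw [solutionLoop, dif_neg h1, dif_pos h2, h3]; simp only []; rw [dif_pos h4, dif_pos h5]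
  | case4 m r left right ans h1 h2 d h3 h4 h5 h6 =>
      rw [solutionLoop, dif_neg h1, dif_pos h2, h3]; simp only []; rw [dif_pos h4, dif_neg h5, h6]
  | case5 m r left right ans h1 h2 d h3 h4 h5 d1 h6 ih =>
      rw [solutionLoop, dif_neg h1, dif_pos h2, h3]; simp only []; rw [dif_pos h4, dif_neg h5, h6]; exact ih
  | case6 m r left right ans h1 h2 d h3 h4 ih =>
      rw [solutionLoop, dif_neg h1, dif_pos h2, h3]; simp only []; rw [dif_neg h4]; exact ih
  | case7 m r left right ans h1 h2 h3 h4 =>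
      rw [solutionLoop, dif_neg h1, dif_neg h2, dif_pos h3, dif_pos h4]
  | case8 m r left right ans h1 h2 h3 h4 h5 =>
      rw [solutionLoop, dif_neg h1, dif_neg h2, dif_pos h3, dif_neg h4, h5]
  | case9 m r left right ans h1 h2 h3 h4 d h5 ih =>
      rw [solutionLoop, dif_neg h1, dif_neg h2, dif_pos h3, dif_neg h4, h5]; exact ih
  | case10 m r left right ans h1 h2 h3 h4 =>
      rw [solutionLoop, dif_neg h1, dif_neg h2, dif_neg h3, dif_pos h4]; exact le_max_left ans left
  | case11 m r left right ans h1 h2 h3 h4 h5 =>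
      rw [solutionLoop, dif_neg h1, dif_neg h2, dif_neg h3, dif_neg h4, h5]; exact le_max_left ans left
  | case12 m r left right ans h1 h2 h3 h4 d h5 ih =>
      rw [solutionLoop, dif_neg h1, dif_neg h2, dif_neg h3, dif_neg h4, h5]
      exact le_trans (le_max_left ans left) ih

-- a recorded value max ans left is 0 or an equal-pair sum
lemma pvRecord (c : List Int) (n m r left right ans l0 : Int)
    (hn : n = (c.length : Int)) (h0 : 0 ≤ l0) (hl0m : l0 ≤ m) (hmr : m ≤ r) (hrn : r < n)
    (hleft : left = pvPre c (m + 1) - pvPre c l0)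
    (hright : right = pvPre c (r + 1) - pvPre c (m + 1))
    (heq : left = right) (hans0 : 0 ≤ ans) (hansP : ans = 0 ∨ pvIsEq c ans) :
    0 ≤ max ans left ∧ (max ans left = 0 ∨ pvIsEq c (max ans left)) := by
  rcases eq_or_lt_of_le hmr with hm | hm
  · -- m = r: right = 0, so left = 0 and max ans 0 = ans
    subst hm
    have hl : left = 0 := by rw [heq, hright]; ring
    rw [hl, max_eq_left hans0]
    exact ⟨hans0, hansP⟩
  · by_cases hle : left ≤ ans
    · rw [max_eq_left hle]; exact ⟨hans0, hansP⟩
    · rw [max_eq_right (by omega)]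
      refine ⟨by omega, Or.inr ⟨l0, m + 1, r + 1, h0, by omega, by omega, by omega, ?_, ?_⟩⟩
      · rw [hleft, hright] at heq; omega
      · omega

-- soundness: starting from a valid sweep state, the result is 0 or an equal-pair sum
lemma solutionLoop_sound (cookie : List Int) (n m r left right ans l0 : Int) :
    n = (cookie.length : Int) → 0 ≤ l0 → l0 ≤ m → m ≤ r → r < n →
    left = pvPre cookie (m + 1) - pvPre cookie l0 →
    right = pvPre cookie (r + 1) - pvPre cookie (m + 1) →
    0 ≤ ans → (ans = 0 ∨ pvIsEq cookie ans) →
    0 ≤ solutionLoop cookie n m r left right ans ∧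
      (solutionLoop cookie n m r left right ans = 0 ∨
        pvIsEq cookie (solutionLoop cookie n m r left right ans)) := by
  induction m, r, left, right, ans using solutionLoop.induct (cookie := cookie) (n := n) with
  | case1 m left right ans =>
      intro _ _ _ _ hrn _ _ _ _
      exact absurd hrn (lt_irrefl n)
  | case2 m r left right ans h1 h2 h3 =>
      intro _ _ _ _ _ _ _ hans0 hansP
      rw [solutionLoop, dif_neg h1, dif_pos h2, h3]
      exact ⟨hans0, hansP⟩
  | case3 m r left right ans h1 h2 d h3 h4 h5 =>
      intro _ _ _ _ _ _ _ hans0 hansP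
      rw [solutionLoop, dif_neg h1, dif_pos h2, h3]; simp only []; rw [dif_pos h4, dif_pos h5]
      exact ⟨hans0, hansP⟩
  | case4 m r left right ans h1 h2 d h3 h4 h5 h6 =>
      intro _ _ _ _ _ _ _ hans0 hansP
      rw [solutionLoop, dif_neg h1, dif_pos h2, h3]; simp only []; rw [dif_pos h4, dif_neg h5, h6]
      exact ⟨hans0, hansP⟩
  | case5 m r left right ans h1 h2 d h3 h4 h5 d1 h6 ih =>
      intro hn h0 hl0m hmr hrn hleft hright hans0 hansP
      rw [solutionLoop, dif_neg h1, dif_pos h2, h3]; simp only []; rw [dif_pos h4, dif_neg h5, h6]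
      have hmr' : m = r := by omega
      subst hmr'
      have hd1 : d1 = d := by rw [h6] at h3; exact Option.some.inj h3
      have hs : pvPre cookie (m + 1 + 1) = pvPre cookie (m + 1) + d :=
        pvPre_succ cookie (m + 1) d (by omega) h3
      have hr1 := pvGetSomeLt h6
      exact ih hn h0 (by omega) (by omega) (by omega)
        (by rw [hs, hleft]; ring)
        (by rw [hs]; rw [hleft, hright] at *; ring_nf; omega)
        hans0 hansP
  | case6 m r left right ans h1 h2 d h3 h4 ih =>
      intro hn h0 hl0m hmr hrn hleft hright hans0 hansP
      rw [solutionLoop, dif_neg h1, dif_pos h2, h3]; simp only []; rw [dif_neg h4]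
      have hs : pvPre cookie (m + 1 + 1) = pvPre cookie (m + 1) + d :=
        pvPre_succ cookie (m + 1) d (by omega) h3
      exact ih hn h0 (by omega) (by omega) hrn
        (by rw [hs, hleft]; ring)
        (by rw [hs, hright]; ring)
        hans0 hansP
  | case7 m r left right ans h1 h2 h3 h4 =>
      intro _ _ _ _ _ _ _ hans0 hansP
      rw [solutionLoop, dif_neg h1, dif_neg h2, dif_pos h3, dif_pos h4]
      exact ⟨hans0, hansP⟩
  | case8 m r left right ans h1 h2 h3 h4 h5 =>
      intro _ _ _ _ _ _ _ hans0 hansP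
      rw [solutionLoop, dif_neg h1, dif_neg h2, dif_pos h3, dif_neg h4, h5]
      exact ⟨hans0, hansP⟩
  | case9 m r left right ans h1 h2 h3 h4 d h5 ih =>
      intro hn h0 hl0m hmr hrn hleft hright hans0 hansP
      rw [solutionLoop, dif_neg h1, dif_neg h2, dif_pos h3, dif_neg h4, h5]
      have hs : pvPre cookie (r + 1 + 1) = pvPre cookie (r + 1) + d :=
        pvPre_succ cookie (r + 1) d (by omega) h5
      have hr1 := pvGetSomeLt h5
      exact ih hn h0 hl0m (by omega) (by omega) hleft
        (by rw [hs, hright]; ring) hans0 hansP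
  | case10 m r left right ans h1 h2 h3 h4 =>
      intro hn h0 hl0m hmr hrn hleft hright hans0 hansP
      rw [solutionLoop, dif_neg h1, dif_neg h2, dif_neg h3, dif_pos h4]
      exact pvRecord cookie n m r left right ans _ hn h0 hl0m hmr hrn hleft hright
        (by omega) hans0 hansP
  | case11 m r left right ans h1 h2 h3 h4 h5 =>
      intro hn h0 hl0m hmr hrn hleft hright hans0 hansP
      rw [solutionLoop, dif_neg h1, dif_neg h2, dif_neg h3, dif_neg h4, h5]
      exact pvRecord cookie n m r left right ans _ hn h0 hl0m hmr hrn hleft hright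
        (by omega) hans0 hansP
  | case12 m r left right ans h1 h2 h3 h4 d h5 ih =>
      intro hn h0 hl0m hmr hrn hleft hright hans0 hansP
      rw [solutionLoop, dif_neg h1, dif_neg h2, dif_neg h3, dif_neg h4, h5]
      have hs : pvPre cookie (r + 1 + 1) = pvPre cookie (r + 1) + d :=
        pvPre_succ cookie (r + 1) d (by omega) h5
      have hr1 := pvGetSomeLt h5
      obtain ⟨ha0, haP⟩ := pvRecord cookie n m r left right ans _ hn h0 hl0m hmr hrn hleft
        hright (by omega) hans0 hansP
      exact ih hn h0 hl0m (by omega) (by omega) hleft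
        (by rw [hs, hright]; ring) ha0 haP

-- completeness (needs nonnegative entries): any equal pair (l,j,k) still ahead of the
-- sweep state gets a value ≥ its sum recorded
lemma solutionLoop_complete (cookie : List Int) (hnn : ∀ x ∈ cookie, 0 ≤ x)
    (n m r left right ans l j k : Int) :
    n = (cookie.length : Int) → 0 ≤ l → l < j → j < k → k ≤ n →
    2 * pvPre cookie j = pvPre cookie l + pvPre cookie k →
    l ≤ m → m ≤ r → m + 1 ≤ j → r + 1 ≤ k →
    left = pvPre cookie (m + 1) - pvPre cookie l →
    right = pvPre cookie (r + 1) - pvPre cookie (m + 1) →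
    pvPre cookie j - pvPre cookie l ≤ solutionLoop cookie n m r left right ans := by
  induction m, r, left, right, ans using solutionLoop.induct (cookie := cookie) (n := n) with
  | case1 m left right ans =>
      intro _ _ _ _ hkn _ _ _ _ hrk _ _
      exact absurd (le_trans hrk hkn) (by omega)
  | case2 m r left right ans h1 h2 h3 =>
      intro hn h0l hlj hjk hkn heq hlm hmr hmj hrk hleft hright
      exfalso
      have hmono := pvPre_mono cookie hnn (r + 1) k (by omega) hrk
      have hj : m + 1 < j := by
        rcases eq_or_lt_of_le hmj with hje | hjl
        · exfalso
          have hpe : pvPre cookie (m + 1) = pvPre cookie j := by rw [hje]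
          omega
        · exact hjl
      obtain ⟨v, hv⟩ := pvGet_in_range cookie (m + 1) (by omega) (by omega)
      rw [hv] at h3; cases h3
  | case3 m r left right ans h1 h2 d h3 h4 h5 =>
      intro hn h0l hlj hjk hkn heq hlm hmr hmj hrk hleft hright
      exfalso
      have hmono := pvPre_mono cookie hnn (r + 1) k (by omega) hrk
      have hj : m + 1 < j := by
        rcases eq_or_lt_of_le hmj with hje | hjl
        · exfalso
          have hpe : pvPre cookie (m + 1) = pvPre cookie j := by rw [hje]
          omega
        · exact hjl
      omega
  | case4 m r left right ans h1 h2 d h3 h4 h5 h6 =>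
      intro hn h0l hlj hjk hkn heq hlm hmr hmj hrk hleft hright
      have hmr' : m = r := by omega
      subst hmr'
      rw [h3] at h6; cases h6
  | case5 m r left right ans h1 h2 d h3 h4 h5 d1 h6 ih =>
      intro hn h0l hlj hjk hkn heq hlm hmr hmj hrk hleft hright
      rw [solutionLoop, dif_neg h1, dif_pos h2, h3]; simp only []; rw [dif_pos h4, dif_neg h5, h6]
      have hmono := pvPre_mono cookie hnn (r + 1) k (by omega) hrk
      have hj : m + 1 < j := by
        rcases eq_or_lt_of_le hmj with hje | hjl
        · exfalso
          have hpe : pvPre cookie (m + 1) = pvPre cookie j := by rw [hje]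
          omega
        · exact hjl
      have hmr' : m = r := by omega
      subst hmr'
      have hd1 : d1 = d := by rw [h6] at h3; exact Option.some.inj h3
      have hs : pvPre cookie (m + 1 + 1) = pvPre cookie (m + 1) + d :=
        pvPre_succ cookie (m + 1) d (by omega) h3
      exact ih hn h0l hlj hjk hkn heq (by omega) (by omega) (by omega) (by omega)
        (by rw [hs, hleft]; ring)
        (by rw [hs]; rw [hleft, hright] at *; ring_nf; omega)
  | case6 m r left right ans h1 h2 d h3 h4 ih =>
      intro hn h0l hlj hjk hkn heq hlm hmr hmj hrk hleft hright
      rw [solutionLoop, dif_neg h1, dif_pos h2, h3]; simp only []; rw [dif_neg h4]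
      have hmono := pvPre_mono cookie hnn (r + 1) k (by omega) hrk
      have hj : m + 1 < j := by
        rcases eq_or_lt_of_le hmj with hje | hjl
        · exfalso
          have hpe : pvPre cookie (m + 1) = pvPre cookie j := by rw [hje]
          omega
        · exact hjl
      have hs : pvPre cookie (m + 1 + 1) = pvPre cookie (m + 1) + d :=
        pvPre_succ cookie (m + 1) d (by omega) h3
      exact ih hn h0l hlj hjk hkn heq (by omega) (by omega) (by omega) hrk
        (by rw [hs, hleft]; ring)
        (by rw [hs, hright]; ring)
  | case7 m r left right ans h1 h2 h3 h4 =>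
      intro hn h0l hlj hjk hkn heq hlm hmr hmj hrk hleft hright
      exfalso
      have hm1 := pvPre_mono cookie hnn (m + 1) j (by omega) hmj
      have hm2 := pvPre_mono cookie hnn l (m + 1) h0l (by omega)
      have hrk' : r + 1 < k := by
        rcases eq_or_lt_of_le hrk with hre | hrl
        · exfalso
          have hpe : pvPre cookie (r + 1) = pvPre cookie k := by rw [hre]
          omega
        · exact hrl
      omega
  | case8 m r left right ans h1 h2 h3 h4 h5 =>
      intro hn h0l hlj hjk hkn heq hlm hmr hmj hrk hleft hright
      exfalso
      have hm1 := pvPre_mono cookie hnn (m + 1) j (by omega) hmj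
      have hm2 := pvPre_mono cookie hnn l (m + 1) h0l (by omega)
      have hrk' : r + 1 < k := by
        rcases eq_or_lt_of_le hrk with hre | hrl
        · exfalso
          have hpe : pvPre cookie (r + 1) = pvPre cookie k := by rw [hre]
          omega
        · exact hrl
      obtain ⟨v, hv⟩ := pvGet_in_range cookie (r + 1) (by omega) (by omega)
      rw [hv] at h5; cases h5
  | case9 m r left right ans h1 h2 h3 h4 d h5 ih =>
      intro hn h0l hlj hjk hkn heq hlm hmr hmj hrk hleft hright
      rw [solutionLoop, dif_neg h1, dif_neg h2, dif_pos h3, dif_neg h4, h5]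
      have hm1 := pvPre_mono cookie hnn (m + 1) j (by omega) hmj
      have hm2 := pvPre_mono cookie hnn l (m + 1) h0l (by omega)
      have hrk' : r + 1 < k := by
        rcases eq_or_lt_of_le hrk with hre | hrl
        · exfalso
          have hpe : pvPre cookie (r + 1) = pvPre cookie k := by rw [hre]
          omega
        · exact hrl
      have hs : pvPre cookie (r + 1 + 1) = pvPre cookie (r + 1) + d :=
        pvPre_succ cookie (r + 1) d (by omega) h5
      exact ih hn h0l hlj hjk hkn heq hlm (by omega) hmj (by omega) hleft
        (by rw [hs, hright]; ring)
  | case10 m r left right ans h1 h2 h3 h4 =>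
      intro hn h0l hlj hjk hkn heq hlm hmr hmj hrk hleft hright
      rw [solutionLoop, dif_neg h1, dif_neg h2, dif_neg h3, dif_pos h4]
      have hke : r + 1 = k := by omega
      have hm1 := pvPre_mono cookie hnn (m + 1) j (by omega) hmj
      have hpe : pvPre cookie (r + 1) = pvPre cookie k := by rw [hke]
      have hlv : left = pvPre cookie j - pvPre cookie l := by omega
      rw [← hlv]
      exact le_max_right ans left
  | case11 m r left right ans h1 h2 h3 h4 h5 =>
      intro hn h0l hlj hjk hkn heq hlm hmr hmj hrk hleft hright
      rw [solutionLoop, dif_neg h1, dif_neg h2, dif_neg h3, dif_neg h4, h5]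
      have hm1 := pvPre_mono cookie hnn (m + 1) j (by omega) hmj
      rcases eq_or_lt_of_le hrk with hke | hkl
      · have hpe : pvPre cookie (r + 1) = pvPre cookie k := by rw [hke]
        have hlv : left = pvPre cookie j - pvPre cookie l := by omega
        rw [← hlv]
        exact le_max_right ans left
      · exfalso
        obtain ⟨v, hv⟩ := pvGet_in_range cookie (r + 1) (by omega) (by omega)
        rw [hv] at h5; cases h5
  | case12 m r left right ans h1 h2 h3 h4 d h5 ih =>
      intro hn h0l hlj hjk hkn heq hlm hmr hmj hrk hleft hright
      rw [solutionLoop, dif_neg h1, dif_neg h2, dif_neg h3, dif_neg h4, h5]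
      have hm1 := pvPre_mono cookie hnn (m + 1) j (by omega) hmj
      rcases eq_or_lt_of_le hrk with hke | hkl
      · have hpe : pvPre cookie (r + 1) = pvPre cookie k := by rw [hke]
        have hlv : left = pvPre cookie j - pvPre cookie l := by omega
        calc pvPre cookie j - pvPre cookie l ≤ max ans left := by rw [← hlv]; exact le_max_right ans left
          _ ≤ _ := solutionLoop_ge cookie n m (r + 1) left (right + d) (max ans left)
      · have hs : pvPre cookie (r + 1 + 1) = pvPre cookie (r + 1) + d :=
          pvPre_succ cookie (r + 1) d (by omega) h5
        exact ih hn h0l hlj hjk hkn heq hlm (by omega) hmj (by omega) hleft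
          (by rw [hs, hright]; ring)

-- A's outer loop body (proof-side name for the lambda in `solution`)
def pvBodyA (cookie : List Int) (ans l : Int) : Int :=
  match PySem.List.pyGet? cookie l, PySem.List.pyGet? cookie (l + 1) with
  | some left, some right =>
      solutionLoop cookie (cookie.length : Int) l (l + 1) left right ans
  | _, _ => ans

lemma solution_eq_fold (cookie : List Int) :
    solution cookie =
      (PySem.List.pyRange 0 ((cookie.length : Int) - 1) 1).foldl (pvBodyA cookie) 0 := rfl

lemma pvBodyA_ge (cookie : List Int) (ans l : Int) : ans ≤ pvBodyA cookie ans l := by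
  unfold pvBodyA
  rcases h1 : PySem.List.pyGet? cookie l with _ | v1
  · exact le_refl ans
  · rcases h2 : PySem.List.pyGet? cookie (l + 1) with _ | v2
    · exact le_refl ans
    · exact solutionLoop_ge cookie _ l (l + 1) v1 v2 ans

lemma pvFoldA_ge (cookie : List Int) (li : List Int) (ans : Int) :
    ans ≤ li.foldl (pvBodyA cookie) ans := by
  induction li generalizing ans with
  | nil => exact le_refl ans
  | cons a t ih => exact le_trans (pvBodyA_ge cookie ans a) (ih _)

lemma pvBodyA_sound (cookie : List Int) (ans a : Int) (h0 : 0 ≤ a)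
    (ha : a < (cookie.length : Int) - 1) (hans0 : 0 ≤ ans)
    (hansP : ans = 0 ∨ pvIsEq cookie ans) :
    0 ≤ pvBodyA cookie ans a ∧
      (pvBodyA cookie ans a = 0 ∨ pvIsEq cookie (pvBodyA cookie ans a)) := by
  obtain ⟨v1, hv1⟩ := pvGet_in_range cookie a h0 (by omega)
  obtain ⟨v2, hv2⟩ := pvGet_in_range cookie (a + 1) (by omega) (by omega)
  unfold pvBodyA
  rw [hv1, hv2]
  simp only []
  have hs1 : pvPre cookie (a + 1) = pvPre cookie a + v1 := pvPre_succ cookie a v1 h0 hv1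
  have hs2 : pvPre cookie (a + 1 + 1) = pvPre cookie (a + 1) + v2 :=
    pvPre_succ cookie (a + 1) v2 (by omega) hv2
  exact solutionLoop_sound cookie (cookie.length : Int) a (a + 1) v1 v2 ans a rfl h0
    (le_refl a) (by omega) (by omega) (by omega) (by omega) hans0 hansP

lemma solution_nonneg_sound (cookie : List Int) :
    0 ≤ solution cookie ∧ (solution cookie = 0 ∨ pvIsEq cookie (solution cookie)) := by
  rw [solution_eq_fold]
  have hmem : ∀ x ∈ PySem.List.pyRange 0 ((cookie.length : Int) - 1) 1,
      0 ≤ x ∧ x < (cookie.length : Int) - 1 := by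
    intro x hx
    exact (PySem.List.mem_pyRange_one).mp hx
  generalize hli : PySem.List.pyRange 0 ((cookie.length : Int) - 1) 1 = li at hmem
  clear hli
  suffices h : ∀ ans, 0 ≤ ans → (ans = 0 ∨ pvIsEq cookie ans) →
      0 ≤ li.foldl (pvBodyA cookie) ans ∧
        (li.foldl (pvBodyA cookie) ans = 0 ∨ pvIsEq cookie (li.foldl (pvBodyA cookie) ans)) by
    exact h 0 (le_refl 0) (Or.inl rfl)
  induction li with
  | nil => intro ans h1 h2; exact ⟨h1, h2⟩
  | cons a t ih =>
      intro ans h1 h2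
      obtain ⟨ha0, hab⟩ := hmem a (List.mem_cons_self)
      obtain ⟨hb1, hb2⟩ := pvBodyA_sound cookie ans a ha0 hab h1 h2
      exact ih (fun x hx => hmem x (List.mem_cons_of_mem a hx)) _ hb1 hb2

lemma solution_complete (cookie : List Int) (hnn : ∀ x ∈ cookie, 0 ≤ x) (v : Int)
    (hv : pvIsEq cookie v) : v ≤ solution cookie := by
  obtain ⟨l, j, k, h0l, hlj, hjk, hkn, heq, hveq⟩ := hv
  rw [solution_eq_fold]
  have hmem : l ∈ PySem.List.pyRange 0 ((cookie.length : Int) - 1) 1 :=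
    (PySem.List.mem_pyRange_one).mpr ⟨h0l, by omega⟩
  obtain ⟨s, t, hst⟩ := List.append_of_mem hmem
  rw [hst, List.foldl_append]
  simp only [List.foldl_cons]
  apply le_trans _ (pvFoldA_ge cookie t _)
  set ans := s.foldl (pvBodyA cookie) 0 with hans
  obtain ⟨v1, hv1⟩ := pvGet_in_range cookie l h0l (by omega)
  obtain ⟨v2, hv2⟩ := pvGet_in_range cookie (l + 1) (by omega) (by omega)
  unfold pvBodyA
  rw [hv1, hv2]
  simp only []
  have hs1 : pvPre cookie (l + 1) = pvPre cookie l + v1 := pvPre_succ cookie l v1 h0l hv1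
  have hs2 : pvPre cookie (l + 1 + 1) = pvPre cookie (l + 1) + v2 :=
    pvPre_succ cookie (l + 1) v2 (by omega) hv2
  rw [hveq]
  exact solutionLoop_complete cookie hnn (cookie.length : Int) l (l + 1) v1 v2 ans l j k
    rfl h0l hlj hjk hkn heq (le_refl l) (by omega) (by omega) (by omega) (by omega) (by omega)

-- B's prefix-sum list
lemma pvAltP_gen (cookie : List Int) : ∀ (ps : List Int) (s : Int),
    cookie.foldl (fun ps x => (ps.1 ++ [ps.2 + x], ps.2 + x)) (ps, s) =
      (ps ++ (List.range cookie.length).map (fun t => s + ((cookie.take (t + 1)).sum)),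
        s + cookie.sum) := by
  induction cookie with
  | nil => intro ps s; simp
  | cons x xs ih =>
      intro ps s
      simp only [List.foldl_cons]
      rw [ih (ps ++ [s + x]) (s + x)]
      rw [List.length_cons, List.range_succ_eq_map]
      simp [List.map_map, Function.comp_def, add_assoc, List.append_assoc]

lemma solutionAltP_fst (cookie : List Int) :
    (solutionAltP cookie).1 =
      [0] ++ (List.range cookie.length).map (fun t => ((cookie.take (t + 1)).sum)) := by
  unfold solutionAltP
  rw [pvAltP_gen cookie [0] 0]
  simp

lemma pvP_get (cookie : List Int) (i : Int) (h0 : 0 ≤ i) (h : i ≤ (cookie.length : Int)) :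
    PySem.List.pyGetD (solutionAltP cookie).1 i 0 = pvPre cookie i := by
  rw [solutionAltP_fst, PySem.List.pyGetD_of_nonneg _ _ h0]
  rcases hi : i.toNat with _ | t
  · have : i = 0 := by omega
    subst this
    simp [pvPre]
  · have ht : t < cookie.length := by omega
    rw [List.singleton_append, List.getD_cons_succ, PySem.List.getD_map_range _ _ _ _ ht]
    unfold pvPre
    rw [hi]

-- proof-side names for B's fold bodies
def pvRightsB (cookie : List Int) (m : Int) : PySem.Set Int :=
  PySem.Set.ofList ((PySem.List.pyRange (m + 1) (cookie.length : Int) 1).map (fun r =>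
    PySem.List.pyGetD (solutionAltP cookie).1 (r + 1) 0 -
      PySem.List.pyGetD (solutionAltP cookie).1 (m + 1) 0))

def pvInnerB (cookie : List Int) (m best l : Int) : Int :=
  if best < (PySem.List.pyGetD (solutionAltP cookie).1 (m + 1) 0 -
        PySem.List.pyGetD (solutionAltP cookie).1 l 0) ∧
      PySem.Set.contains (pvRightsB cookie m)
        (PySem.List.pyGetD (solutionAltP cookie).1 (m + 1) 0 -
          PySem.List.pyGetD (solutionAltP cookie).1 l 0)
    then PySem.List.pyGetD (solutionAltP cookie).1 (m + 1) 0 -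
      PySem.List.pyGetD (solutionAltP cookie).1 l 0
    else best

def pvBodyB (cookie : List Int) (best m : Int) : Int :=
  (PySem.List.pyRange 0 (m + 1) 1).foldl (pvInnerB cookie m) best

lemma solution_alt_eq_fold (cookie : List Int) :
    solution_alt cookie =
      (PySem.List.pyRange 0 ((cookie.length : Int) - 1) 1).foldl (pvBodyB cookie) 0 := rfl

lemma pvFoldl_ge (f : Int → Int → Int) (hf : ∀ b x, b ≤ f b x) :
    ∀ (li : List Int) (b : Int), b ≤ li.foldl f b := by
  intro li
  induction li with
  | nil => intro b; exact le_refl b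
  | cons a t ih => intro b; exact le_trans (hf b a) (ih (f b a))

lemma pvInnerB_ge (cookie : List Int) (m best l : Int) : best ≤ pvInnerB cookie m best l := by
  unfold pvInnerB
  split_ifs with h
  · exact le_of_lt h.1
  · exact le_refl best

lemma pvBodyB_ge (cookie : List Int) (best m : Int) : best ≤ pvBodyB cookie best m :=
  pvFoldl_ge (pvInnerB cookie m) (pvInnerB_ge cookie m) _ best

lemma pvInnerB_sound (cookie : List Int) (m best l : Int)
    (hm0 : 0 ≤ m) (hmn : m < (cookie.length : Int) - 1)
    (hl0 : 0 ≤ l) (hlm : l < m + 1)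
    (hb0 : 0 ≤ best) (hbP : best = 0 ∨ pvIsEq cookie best) :
    0 ≤ pvInnerB cookie m best l ∧
      (pvInnerB cookie m best l = 0 ∨ pvIsEq cookie (pvInnerB cookie m best l)) := by
  unfold pvInnerB
  split_ifs with h
  · obtain ⟨hlt, hcont⟩ := h
    have hv0 := (PySem.Set.contains_iff _ _).mp hcont
    unfold pvRightsB at hv0
    have hv := (PySem.Set.mem_ofList _ _).mp hv0
    obtain ⟨r, hr, hveq⟩ := List.mem_map.mp hv
    have hrb := (PySem.List.mem_pyRange_one).mp hr
    rw [pvP_get cookie (m + 1) (by omega) (by omega),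
        pvP_get cookie l hl0 (by omega)] at hlt hveq ⊢
    rw [pvP_get cookie (r + 1) (by omega) (by omega)] at hveq
    refine ⟨by omega, Or.inr ⟨l, m + 1, r + 1, hl0, by omega, by omega, by omega, by omega, rfl⟩⟩
  · exact ⟨hb0, hbP⟩

lemma pvBodyB_sound (cookie : List Int) (best m : Int)
    (hm0 : 0 ≤ m) (hmn : m < (cookie.length : Int) - 1)
    (hb0 : 0 ≤ best) (hbP : best = 0 ∨ pvIsEq cookie best) :
    0 ≤ pvBodyB cookie best m ∧
      (pvBodyB cookie best m = 0 ∨ pvIsEq cookie (pvBodyB cookie best m)) := by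
  unfold pvBodyB
  have hmem : ∀ x ∈ PySem.List.pyRange 0 (m + 1) 1, 0 ≤ x ∧ x < m + 1 := by
    intro x hx; exact (PySem.List.mem_pyRange_one).mp hx
  generalize hli : PySem.List.pyRange 0 (m + 1) 1 = li at hmem
  clear hli
  revert hb0 hbP
  suffices h : ∀ b, 0 ≤ b → (b = 0 ∨ pvIsEq cookie b) →
      0 ≤ li.foldl (pvInnerB cookie m) b ∧
        (li.foldl (pvInnerB cookie m) b = 0 ∨ pvIsEq cookie (li.foldl (pvInnerB cookie m) b)) by
    intro hb0 hbP; exact h best hb0 hbP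
  induction li with
  | nil => intro b h1 h2; exact ⟨h1, h2⟩
  | cons a t ih =>
      intro b h1 h2
      obtain ⟨ha0, hab⟩ := hmem a (List.mem_cons_self)
      obtain ⟨h1', h2'⟩ := pvInnerB_sound cookie m b a hm0 hmn ha0 hab h1 h2
      exact ih (fun x hx => hmem x (List.mem_cons_of_mem a hx)) _ h1' h2'

lemma solution_alt_nonneg_sound (cookie : List Int) :
    0 ≤ solution_alt cookie ∧
      (solution_alt cookie = 0 ∨ pvIsEq cookie (solution_alt cookie)) := by
  rw [solution_alt_eq_fold]
  have hmem : ∀ x ∈ PySem.List.pyRange 0 ((cookie.length : Int) - 1) 1,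
      0 ≤ x ∧ x < (cookie.length : Int) - 1 := by
    intro x hx; exact (PySem.List.mem_pyRange_one).mp hx
  generalize hli : PySem.List.pyRange 0 ((cookie.length : Int) - 1) 1 = li at hmem
  clear hli
  suffices h : ∀ best, 0 ≤ best → (best = 0 ∨ pvIsEq cookie best) →
      0 ≤ li.foldl (pvBodyB cookie) best ∧
        (li.foldl (pvBodyB cookie) best = 0 ∨ pvIsEq cookie (li.foldl (pvBodyB cookie) best)) by
    exact h 0 (le_refl 0) (Or.inl rfl)
  induction li with
  | nil => intro best h1 h2; exact ⟨h1, h2⟩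
  | cons a t ih =>
      intro best h1 h2
      obtain ⟨ha0, hab⟩ := hmem a (List.mem_cons_self)
      obtain ⟨hb1, hb2⟩ := pvBodyB_sound cookie best a ha0 hab h1 h2
      exact ih (fun x hx => hmem x (List.mem_cons_of_mem a hx)) _ hb1 hb2

lemma solution_alt_complete (cookie : List Int) (v : Int) (hv : pvIsEq cookie v) :
    v ≤ solution_alt cookie := by
  obtain ⟨l, j, k, h0l, hlj, hjk, hkn, heq, hveq⟩ := hv
  rw [solution_alt_eq_fold]
  have hmem : (j - 1) ∈ PySem.List.pyRange 0 ((cookie.length : Int) - 1) 1 :=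
    (PySem.List.mem_pyRange_one).mpr ⟨by omega, by omega⟩
  obtain ⟨s, t, hst⟩ := List.append_of_mem hmem
  rw [hst, List.foldl_append]
  simp only [List.foldl_cons]
  apply le_trans _ (pvFoldl_ge (pvBodyB cookie) (pvBodyB_ge cookie) t _)
  set best := s.foldl (pvBodyB cookie) 0 with hbest
  unfold pvBodyB
  have hmem2 : l ∈ PySem.List.pyRange 0 (j - 1 + 1) 1 :=
    (PySem.List.mem_pyRange_one).mpr ⟨h0l, by omega⟩
  obtain ⟨s2, t2, hst2⟩ := List.append_of_mem hmem2
  rw [hst2, List.foldl_append]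
  simp only [List.foldl_cons]
  apply le_trans _ (pvFoldl_ge (pvInnerB cookie (j - 1)) (pvInnerB_ge cookie (j - 1)) t2 _)
  set b2 := s2.foldl (pvInnerB cookie (j - 1)) best with hb2
  unfold pvInnerB
  have hj1 : j - 1 + 1 = j := by omega
  rw [hj1, pvP_get cookie j (by omega) (by omega), pvP_get cookie l h0l (by omega)]
  have hcont : PySem.Set.contains (pvRightsB cookie (j - 1)) (pvPre cookie j - pvPre cookie l) = true := by
    unfold pvRightsB
    rw [PySem.Set.contains_iff, PySem.Set.mem_ofList]
    apply List.mem_map.mpr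
    refine ⟨k - 1, (PySem.List.mem_pyRange_one).mpr ⟨by omega, by omega⟩, ?_⟩
    have hk1 : k - 1 + 1 = k := by omega
    rw [hj1, hk1, pvP_get cookie k (by omega) hkn, pvP_get cookie j (by omega) (by omega)]
    omega
  rw [hcont]
  simp only [and_true]
  split_ifs with hlt
  · omega
  · omega

-- ===== VERDICT (by name: the statement is the Claim_ definition above) =====
theorem solution_spec : Claim_equal_solution := by
  unfold Claim_equal_solution
  intro cookie _hdom hpre
  unfold Spec_solution
  obtain ⟨ha0, has⟩ := solution_nonneg_sound cookie
  obtain ⟨hb0, hbs⟩ := solution_alt_nonneg_sound cookie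
  apply le_antisymm
  · rcases has with h | h
    · omega
    · exact solution_alt_complete cookie _ h
  · rcases hbs with h | h
    · omega
    · exact solution_complete cookie hpre _ h
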